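-- pv_equiv track=rewrite | github.com/saher-alhusayan/advent-of-code | year_2022/day_9/answer.py | different_level_move
-- ===== SOURCE A (Python) =====
-- from typing import List, Tuple
--
-- INSTRUCTION = {
--     "R": (1, 0),
--     "D": (0, -1),
--     "L": (-1, 0),
--     "U": (0, 1),
-- }
--
-- def different_level_move(
--     distance: str, direction: str, head: Tuple[int, int], tail: Tuple[int, int]
-- ):
--     temp_path = []
--     for _ in range(int(distance)):
--         head = (
--             head[0] + INSTRUCTION[direction][0],
--             head[1] + INSTRUCTION[direction][1],
--         )
--         temp_path.append(head)
--     if int(distance) <= 2: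
--         return [], head, tail
--     else:
--         temp_path.pop()
--         if temp_path:
--             tail = temp_path[-1]
--         temp_path.reverse()
--         temp_path.pop()
--     return temp_path, head, tail
-- ===== SOURCE B (Python) =====
-- INSTRUCTION = {
--     "R": (1, 0),
--     "D": (0, -1),
--     "L": (-1, 0),
--     "U": (0, 1),
-- }
--
-- def different_level_move(distance, direction, head, tail):
--     d = int(distance)
--     if d <= 0:
--         return [], head, tail
--     dx, dy = INSTRUCTION[direction]
--     new_head = (head[0] + d * dx, head[1] + d * dy)
--     if d <= 2:
--         return [], new_head, tail
--     path = [(head[0] + i * dx, head[1] + i * dy) for i in range(d - 1, 1, -1)]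
--     return path, new_head, (head[0] + (d - 1) * dx, head[1] + (d - 1) * dy)
-- ===== Notes on version B (the rewrite author's own statement) =====
-- stated objective: simpler
-- what changed: B replaces A's simulate-every-step-then-pop/reverse/pop list surgery with a closed-form head/tail computation and a direct descending-range comprehension for the path.
import Mathlib
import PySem

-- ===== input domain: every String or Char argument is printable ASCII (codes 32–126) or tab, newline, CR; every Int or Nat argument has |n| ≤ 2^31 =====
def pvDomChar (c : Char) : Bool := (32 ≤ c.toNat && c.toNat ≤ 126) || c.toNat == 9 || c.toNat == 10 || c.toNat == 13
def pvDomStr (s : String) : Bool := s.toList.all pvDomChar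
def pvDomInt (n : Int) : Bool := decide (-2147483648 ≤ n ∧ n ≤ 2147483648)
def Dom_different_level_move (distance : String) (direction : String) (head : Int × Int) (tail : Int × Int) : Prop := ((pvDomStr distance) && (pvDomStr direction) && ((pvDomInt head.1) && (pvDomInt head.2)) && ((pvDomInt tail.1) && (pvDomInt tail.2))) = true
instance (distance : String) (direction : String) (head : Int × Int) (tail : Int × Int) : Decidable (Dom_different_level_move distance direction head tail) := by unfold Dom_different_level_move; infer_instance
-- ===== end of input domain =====

-- B computes the same result by closed-form arithmetic (head/tail directly, path by a
-- descending-range comprehension) instead of A's step-by-step simulation plus pop/reverse/pop.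

-- ===== PORT A =====
def pvINSTRUCTION : PySem.Dict String (Int × Int) :=
  ((((PySem.Dict.empty).insert "R" (1, 0)).insert "D" (0, -1)).insert "L" (-1, 0)).insert "U" (0, 1)

def different_level_move (distance : String) (direction : String) (head : Int × Int) (tail : Int × Int) : (List (Int × Int)) × (Int × Int) × (Int × Int) :=
  match PySem.Int.ofStr? distance with
  | none => ([], head, tail)  -- int(distance) raises ValueError; excluded by Pre_
  | some d =>
    -- INSTRUCTION[direction] raises KeyError when the loop runs and direction is absent; excluded by Pre_
    let delta := (pvINSTRUCTION.get? direction).getD (0, 0)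
    let st := (PySem.List.pyRange 0 d 1).foldl
      (fun (s : (Int × Int) × List (Int × Int)) _ =>
        let h := (s.1.1 + delta.1, s.1.2 + delta.2)
        (h, s.2 ++ [h])) (head, [])
    if d ≤ 2 then ([], st.1, tail)
    else
      match PySem.List.pop? st.2 (-1) with
      | none => ([], st.1, tail)  -- unreachable: d > 2 means temp_path is nonempty
      | some (_, temp1) =>
        let tail1 := if temp1 = [] then tail else (PySem.List.pyGet? temp1 (-1)).getD tail
        match PySem.List.pop? temp1.reverse (-1) with
        | none => ([], st.1, tail1)  -- unreachable likewise
        | some (_, temp2) => (temp2, st.1, tail1)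

-- ===== PORT B =====
def different_level_move_alt (distance : String) (direction : String) (head : Int × Int) (tail : Int × Int) : (List (Int × Int)) × (Int × Int) × (Int × Int) :=
  match PySem.Int.ofStr? distance with
  | none => ([], head, tail)  -- int(distance) raises ValueError; excluded by Pre_
  | some d =>
    if d ≤ 0 then ([], head, tail)
    else
      -- INSTRUCTION[direction] raises KeyError for an unknown direction (d ≥ 1 here); excluded by Pre_
      let delta := (pvINSTRUCTION.get? direction).getD (0, 0)
      let nh := (head.1 + d * delta.1, head.2 + d * delta.2)
      if d ≤ 2 then ([], nh, tail)
      else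
        ((PySem.List.pyRange (d - 1) 1 (-1)).map (fun i => (head.1 + i * delta.1, head.2 + i * delta.2)),
         nh, (head.1 + (d - 1) * delta.1, head.2 + (d - 1) * delta.2))

-- ===== PRECONDITION & SPEC =====
-- Pre_ excludes exactly the inputs where A raises: an unparsable distance (ValueError),
-- or a positive distance with a direction outside INSTRUCTION (KeyError in the loop).
def Pre_different_level_move (distance : String) (direction : String) (head : Int × Int) (tail : Int × Int) : Prop :=
  (PySem.Int.ofStr? distance).isSome ∧
  (1 ≤ (PySem.Int.ofStr? distance).getD 0 → direction ∈ ["R", "D", "L", "U"])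
instance (distance : String) (direction : String) (head : Int × Int) (tail : Int × Int) : Decidable (Pre_different_level_move distance direction head tail) := by unfold Pre_different_level_move; infer_instance

def pvWitness_different_level_move : String × String × (Int × Int) × (Int × Int) := ("5", "R", (0, 0), (3, 3))

def Spec_different_level_move (distance : String) (direction : String) (head : Int × Int) (tail : Int × Int) (out : (List (Int × Int)) × (Int × Int) × (Int × Int)) : Prop := out = different_level_move_alt distance direction head tail
instance (distance : String) (direction : String) (head : Int × Int) (tail : Int × Int) (out : (List (Int × Int)) × (Int × Int) × (Int × Int)) : Decidable (Spec_different_level_move distance direction head tail out) := by unfold Spec_different_level_move; infer_instance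

-- ===== CLAIM (what is proved, stated in full; the proofs are below) =====
def Claim_equal_different_level_move : Prop := ∀ (distance : String) (direction : String) (head : Int × Int) (tail : Int × Int), Dom_different_level_move distance direction head tail → Pre_different_level_move distance direction head tail → Spec_different_level_move distance direction head tail (different_level_move distance direction head tail)

-- ===== LEMMAS AND PROOFS =====

-- A's loop, characterised: after n steps the head has moved n·Δ and the path lists positions 1·Δ … n·Δ.
lemma pvLoop (delta h0 : Int × Int) (n : Nat) :
    (PySem.List.pyRange 0 (n : Int) 1).foldl
      (fun (s : (Int × Int) × List (Int × Int)) _ =>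
        let h := (s.1.1 + delta.1, s.1.2 + delta.2)
        (h, s.2 ++ [h])) (h0, []) =
    ((h0.1 + n * delta.1, h0.2 + n * delta.2),
     (PySem.List.pyRange 1 ((n : Int) + 1) 1).map (fun i => (h0.1 + i * delta.1, h0.2 + i * delta.2))) := by
  induction n with
  | zero =>
    rw [PySem.List.pyRange_one_eq_nil (by omega), PySem.List.pyRange_one_eq_nil (by omega)]
    simp
  | succ n ih =>
    rw [show ((n + 1 : Nat) : Int) = (n : Int) + 1 by push_cast; ring,
      PySem.List.pyRange_one_succ_right (by omega : (0:Int) ≤ n), List.foldl_append, ih,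
      PySem.List.pyRange_one_succ_right (by omega : (1:Int) ≤ (n:Int) + 1), List.map_append]
    simp only [List.foldl_cons, List.foldl_nil, List.map_cons, List.map_nil]
    have e1 : h0.1 + ((n : Int) + 1) * delta.1 = h0.1 + n * delta.1 + delta.1 := by ring
    have e2 : h0.2 + ((n : Int) + 1) * delta.2 = h0.2 + n * delta.2 + delta.2 := by ring
    rw [e1, e2]

-- ===== VERDICT (by name: the statement is the Claim_ definition above) =====
theorem different_level_move_spec : Claim_equal_different_level_move := by
  intro distance direction head tail _ hpre
  obtain ⟨hsome, hdir⟩ := hpre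
  unfold Spec_different_level_move different_level_move different_level_move_alt
  obtain ⟨d, hd⟩ := Option.isSome_iff_exists.mp hsome
  rw [hd]
  dsimp only
  simp only [hd, Option.getD_some] at hdir
  by_cases hd0 : d ≤ 0
  · -- loop never runs
    rw [if_pos hd0, if_pos (by omega : d ≤ 2), PySem.List.pyRange_one_eq_nil hd0]
    simp
  · rw [if_neg hd0]
    have hmem := hdir (by omega)
    simp only [List.mem_cons, List.not_mem_nil, or_false] at hmem
    have hΔ : ∃ dl, pvINSTRUCTION.get? direction = some dl := by
      rcases hmem with h | h | h | h <;> subst h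
      · exact ⟨(1, 0), by decide⟩
      · exact ⟨(0, -1), by decide⟩
      · exact ⟨(-1, 0), by decide⟩
      · exact ⟨(0, 1), by decide⟩
    obtain ⟨delta, hΔ⟩ := hΔ
    rw [hΔ]
    simp only [Option.getD_some]
    have hcast : ((d.toNat : Int)) = d := Int.toNat_of_nonneg (by omega)
    have hloop := pvLoop delta head d.toNat
    rw [hcast] at hloop
    rw [hloop]
    by_cases hd2 : d ≤ 2
    · rw [if_pos hd2, if_pos hd2]
    · rw [if_neg hd2, if_neg hd2]
      set f : Int → Int × Int := fun i => (head.1 + i * delta.1, head.2 + i * delta.2) with hf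
      -- temp_path = f 1 … f d ; pop the last element f d
      rw [show d + 1 = (d - 1 + 1) + 1 by ring,
        PySem.List.pyRange_one_succ_right (by omega : (1:Int) ≤ d - 1 + 1), List.map_append]
      simp only [List.map_cons, List.map_nil]
      rw [PySem.List.pop?_last]
      dsimp only
      -- remaining = f 1 … f (d-1); tail becomes its last element f (d-1)
      have hsplit : PySem.List.pyRange 1 (d - 1 + 1) 1
          = 1 :: PySem.List.pyRange 2 (d - 1 + 1) 1 := by
        rw [PySem.List.pyRange_one_cons (by omega)]; norm_num
      have hne : (PySem.List.pyRange 1 (d - 1 + 1) 1).map f ≠ [] := by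
        rw [hsplit]; simp
      rw [if_neg hne]
      have hlast : PySem.List.pyRange 1 (d - 1 + 1) 1
          = PySem.List.pyRange 1 (d - 1) 1 ++ [d - 1] := by
        rw [PySem.List.pyRange_one_succ_right (by omega : (1:Int) ≤ d - 1)]
      rw [hlast, List.map_append, List.map_singleton, PySem.List.pyGet?_neg_one_append_singleton,
        Option.getD_some]
      rw [show [f (d - 1)] = List.map f [d - 1] from rfl, ← List.map_append, ← hlast, hsplit]
      simp only [List.map_cons, List.reverse_cons]
      rw [PySem.List.pop?_last]
      dsimp only
      have hrev : PySem.List.pyRange (d - 1) 1 (-1)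
          = (PySem.List.pyRange 2 (d - 1 + 1) 1).reverse := by
        rw [PySem.List.pyRange_neg_one_eq_reverse]; norm_num
      rw [hrev, List.map_reverse]
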